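-- pv_equiv track=rewrite | github.com/selfreferencing/erdos-86-lean | Zeroless/exp59_run_structure.py | find_unprotected_5_lsb
-- ===== SOURCE A (Python) =====
-- def find_unprotected_5_lsb(n):
--     """
--     Find positions where digit 5 has carry-in = 0 when doubling.
--     Returns list of (position, context) tuples.
--     """
--     s = str(2 ** n)
--     digits = [int(d) for d in reversed(s)]  # LSB first
--
--     unprotected = []
--     carry = 0
--     for i, d in enumerate(digits):
--         if d == 5 and carry == 0:
--             # Get context: digit to left and right
--             left = digits[i+1] if i+1 < len(digits) else None
--             right = digits[i-1] if i > 0 else None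
--             unprotected.append((i, f"...{left if left else ''}[5]{right if right else ''}..."))
--         val = 2 * d + carry
--         carry = val // 10
--
--     return unprotected
-- ===== SOURCE B (Python) =====
-- def find_unprotected_5_lsb(n):
--     """
--     Find positions where digit 5 has carry-in = 0 when doubling.
--     Returns list of (position, context) tuples.
--
--     When doubling, a digit produces carry-out 1 iff it is >= 5 (regardless of
--     carry-in, since 2*4+1 = 9 < 10), so the carry into position i is simply
--     whether digits[i-1] >= 5; no running carry accumulator is needed.
--     """
--     digits = [int(d) for d in reversed(str(2 ** n))]  # LSB first
--
--     def ctx(i):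
--         left = digits[i + 1] if i + 1 < len(digits) else None
--         right = digits[i - 1] if i > 0 else None
--         return f"...{left if left else ''}[5]{right if right else ''}..."
--
--     return [(i, ctx(i))
--             for i, d in enumerate(digits)
--             if d == 5 and (i == 0 or digits[i - 1] < 5)]
-- ===== Notes on version B (the rewrite author's own statement) =====
-- stated objective: simpler
-- what changed: The sequential carry accumulator is removed: doubling a digit carries out iff that digit is at least five regardless of carry-in, so B replaces A's stateful fold with a stateless filter comparing each digit and its predecessor against five.
import Mathlib
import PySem

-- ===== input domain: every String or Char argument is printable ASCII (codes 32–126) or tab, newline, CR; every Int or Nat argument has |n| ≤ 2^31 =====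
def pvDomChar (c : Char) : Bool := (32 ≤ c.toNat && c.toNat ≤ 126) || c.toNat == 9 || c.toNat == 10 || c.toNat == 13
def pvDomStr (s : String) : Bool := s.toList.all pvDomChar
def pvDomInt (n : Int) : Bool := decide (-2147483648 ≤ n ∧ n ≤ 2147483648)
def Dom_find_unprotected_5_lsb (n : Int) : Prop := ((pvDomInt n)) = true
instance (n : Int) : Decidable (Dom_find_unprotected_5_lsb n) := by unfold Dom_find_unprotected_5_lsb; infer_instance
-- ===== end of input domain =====

-- B removes A's running carry accumulator (carry-out of doubling a digit is d >= 5
-- regardless of carry-in) and uses a stateless filter over the digit positions; objective: simpler.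


-- ===== PORT A =====
-- digits of str(2**n), LSB first; int(d) ported as code-point arithmetic, exact on the
-- digit characters PySem.Int.toStr produces for a nonnegative argument (Pre_ gives 0 ≤ n)
def pvDigits (n : Int) : List Int :=
  (PySem.Int.toStr (2 ^ n.toNat)).toList.reverse.map (fun c => ((c.toNat : Int) - 48))

-- the body of A's for-loop: state = (unprotected, carry)
def pvStepA (digits : List Int) (st : List (Int × String) × Int) (p : Int × Int) :
    List (Int × String) × Int :=
  let i := p.1
  let d := p.2
  let st1 :=
    if d == 5 && st.2 == 0 then
      let left : Option Int :=
        if i + 1 < PySem.List.len digits then PySem.List.pyGet? digits (i + 1) else none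
      let right : Option Int :=
        if 0 < i then PySem.List.pyGet? digits (i - 1) else none
      st.1 ++ [(i, "..." ++
        (match left with | some l => if l == 0 then "" else PySem.Int.toStr l | none => "") ++
        "[5]" ++
        (match right with | some r => if r == 0 then "" else PySem.Int.toStr r | none => "") ++
        "...")]
    else st.1
  (st1, PySem.Int.floordiv (2 * d + st.2) 10)

def find_unprotected_5_lsb (n : Int) : List (Int × String) :=
  let digits := pvDigits n
  ((PySem.List.enumerate digits).foldl (pvStepA digits) ([], 0)).1

-- ===== PORT B =====
-- Source B's ctx helper: context string around position i (a 0 or absent neighbour prints as '')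
def pvShow (o : Option Int) : String :=
  match o with | some l => if l == 0 then "" else PySem.Int.toStr l | none => ""

def pvCtx (digits : List Int) (i : Int) : String :=
  let left : Option Int :=
    if i + 1 < PySem.List.len digits then PySem.List.pyGet? digits (i + 1) else none
  let right : Option Int :=
    if 0 < i then PySem.List.pyGet? digits (i - 1) else none
  "..." ++ pvShow left ++ "[5]" ++ pvShow right ++ "..."

-- Source B's comprehension condition: d == 5 and (i == 0 or digits[i-1] < 5)
def pvTestB (digits : List Int) (p : Int × Int) : Bool :=
  p.2 == 5 && (p.1 == 0 ||
    (match PySem.List.pyGet? digits (p.1 - 1) with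
     | some x => decide (x < 5)
     | none => false))

def find_unprotected_5_lsb_alt (n : Int) : List (Int × String) :=
  let digits := pvDigits n
  ((PySem.List.enumerate digits).filter (pvTestB digits)).map
    (fun p => (p.1, pvCtx digits p.1))

-- ===== PRECONDITION & SPEC =====
-- Pre_: 2**n is an integer only for n ≥ 0; for n < 0 Python's int(d) hits '.' and raises ValueError.
def Pre_find_unprotected_5_lsb (n : Int) : Prop := 0 ≤ n
instance (n : Int) : Decidable (Pre_find_unprotected_5_lsb n) := by
  unfold Pre_find_unprotected_5_lsb; infer_instance

def pvWitness_find_unprotected_5_lsb : Int := 5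

def Spec_find_unprotected_5_lsb (n : Int) (out : List (Int × String)) : Prop :=
  out = find_unprotected_5_lsb_alt n
instance (n : Int) (out : List (Int × String)) : Decidable (Spec_find_unprotected_5_lsb n out) := by
  unfold Spec_find_unprotected_5_lsb; infer_instance

-- ===== CLAIM (what is proved, stated in full; the proofs are below) =====
def Claim_equal_find_unprotected_5_lsb : Prop :=
  ∀ (n : Int), Dom_find_unprotected_5_lsb n → Pre_find_unprotected_5_lsb n →
    Spec_find_unprotected_5_lsb n (find_unprotected_5_lsb n)

-- ===== LEMMAS AND PROOFS =====

-- every character Nat.toDigitsCore produces is a decimal digit character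
theorem pvToDigitsCore_mem (f : Nat) : ∀ (m : Nat) (ds : List Char),
    (∀ c ∈ ds, 48 ≤ c.toNat ∧ c.toNat ≤ 57) →
    ∀ c ∈ Nat.toDigitsCore 10 f m ds, 48 ≤ c.toNat ∧ c.toNat ≤ 57 := by
  induction f with
  | zero => intro m ds hds c hc; exact hds c hc
  | succ f ih =>
    intro m ds hds c hc
    have hd : 48 ≤ (Nat.digitChar (m % 10)).toNat ∧ (Nat.digitChar (m % 10)).toNat ≤ 57 := by
      have h10 : m % 10 < 10 := Nat.mod_lt _ (by norm_num)
      set r := m % 10 with hr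
      interval_cases r <;> decide
    simp only [Nat.toDigitsCore] at hc
    split at hc
    · rw [List.mem_cons] at hc
      rcases hc with h | h
      · subst h; exact hd
      · exact hds c h
    · exact ih (m / 10) _ (by
        intro c' hc'
        rw [List.mem_cons] at hc'
        rcases hc' with h | h
        · subst h; exact hd
        · exact hds c' h) c hc

theorem pvDigits_bounds (n : Int) : ∀ d ∈ pvDigits n, 0 ≤ d ∧ d ≤ 9 := by
  intro d hd
  simp only [pvDigits, List.mem_map, List.mem_reverse] at hd
  obtain ⟨c, hc, rfl⟩ := hd
  have hcs : 48 ≤ c.toNat ∧ c.toNat ≤ 57 := by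
    have h2 : (0 : Int) ≤ 2 ^ n.toNat := by positivity
    have : (PySem.Int.toStr (2 ^ n.toNat)).toList = Nat.toDigits 10 (2 ^ n.toNat : Int).toNat := by
      rw [PySem.Int.toList_toStr]
      simp only [PySem.Int.toChars, if_neg (by omega : ¬ (2 ^ n.toNat : Int) < 0)]
    rw [this] at hc
    exact pvToDigitsCore_mem _ _ _ (by intro c hc; simp at hc) c hc
  omega

-- A's carry after processing the digits `pre`: 1 iff the last digit of `pre` is ≥ 5
def pvCarry (pre : List Int) : Int :=
  match pre.getLast? with
  | none => 0
  | some d => if 5 ≤ d then 1 else 0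

theorem pvCarry_bounds (pre : List Int) : 0 ≤ pvCarry pre ∧ pvCarry pre ≤ 1 := by
  unfold pvCarry
  rcases pre.getLast? with _ | d <;> simp <;> split <;> simp

theorem pvCarry_step (pre : List Int) (d : Int) (hd : 0 ≤ d ∧ d ≤ 9) :
    PySem.Int.floordiv (2 * d + pvCarry pre) 10 = pvCarry (pre ++ [d]) := by
  have hc := pvCarry_bounds pre
  rw [PySem.Int.floordiv_eq_ediv_of_pos (by norm_num)]
  have : (pre ++ [d]).getLast? = some d := by simp
  unfold pvCarry
  rw [this]
  split <;> omega

-- B's lookup digits[i-1] at i = pre.length, pre ≠ [], is pre's last digit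
theorem pvGet_last (pre rest : List Int) (h : pre ≠ []) :
    PySem.List.pyGet? (pre ++ rest) ((pre.length : Int) - 1) = pre.getLast? := by
  have hlen : 0 < pre.length := List.length_pos_iff.mpr h
  have : ((pre.length : Int) - 1) = ((pre.length - 1 : Nat) : Int) := by omega
  rw [this, PySem.List.pyGet?_natCast]
  rw [List.getElem?_append_left (by omega)]
  rw [List.getLast?_eq_getElem?]

-- the main loop invariant: A's fold from carry = pvCarry pre over the suffix `ds`
-- equals acc ++ B's filtered/mapped suffix
theorem pvLoop_eq (ds0 : List Int) (hb : ∀ d ∈ ds0, 0 ≤ d ∧ d ≤ 9) :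
    ∀ (ds pre : List Int) (acc : List (Int × String)),
      ds0 = pre ++ ds →
      ((PySem.List.enumerate ds (pre.length : Int)).foldl (pvStepA ds0) (acc, pvCarry pre)).1
        = acc ++ ((PySem.List.enumerate ds (pre.length : Int)).filter (pvTestB ds0)).map
            (fun p => (p.1, pvCtx ds0 p.1)) := by
  intro ds
  induction ds with
  | nil =>
    intro pre acc _
    simp [PySem.List.enumerate_nil]
  | cons d tl ih =>
    intro pre acc heq
    have hd : 0 ≤ d ∧ d ≤ 9 := hb d (by rw [heq]; simp)
    rw [PySem.List.enumerate_cons]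
    -- the branch conditions agree: carry = 0  ↔  i == 0 or digits[i-1] < 5
    have hcond : ((d == 5) && (pvCarry pre == 0)) = pvTestB ds0 ((pre.length : Int), d) := by
      unfold pvTestB
      rcases List.eq_nil_or_concat pre with rfl | ⟨pre', x, rfl⟩
      · simp [pvCarry]
      · simp only [List.concat_eq_append] at heq ⊢
        have hne : pre' ++ [x] ≠ [] := by simp
        have hget := pvGet_last (pre' ++ [x]) (d :: tl) hne
        rw [heq, hget]
        have hlast : (pre' ++ [x]).getLast? = some x := by simp
        rw [hlast]
        have hx : 0 ≤ x ∧ x ≤ 9 := hb x (by rw [heq]; simp)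
        simp only [pvCarry, hlast]
        have hpos : ¬ (((pre' ++ [x]).length : Int) == 0) = true := by
          simp only [beq_iff_eq, List.length_append, List.length_singleton]
          push_cast
          omega
        by_cases h5 : 5 ≤ x
        · simp [if_pos h5, beq_iff_eq, decide_eq_true_eq]
          omega
        · simp [if_neg h5, beq_iff_eq, decide_eq_true_eq]
          omega
    -- step A once, then apply the IH with pre := pre ++ [d]
    have hstep : pvStepA ds0 (acc, pvCarry pre) ((pre.length : Int), d)
        = (if pvTestB ds0 ((pre.length : Int), d) then
             acc ++ [((pre.length : Int), pvCtx ds0 (pre.length : Int))] else acc,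
           pvCarry (pre ++ [d])) := by
      unfold pvStepA
      rw [← pvCarry_step pre d hd]
      simp only [← hcond]
      by_cases hc : ((d == 5) && (pvCarry pre == 0)) = true
      · simp only [hc, if_true, pvCtx, pvShow]
      · simp only [Bool.not_eq_true] at hc
        simp only [hc, Bool.false_eq_true, if_false]
    rw [List.foldl_cons, hstep]
    have hlen : ((pre ++ [d]).length : Int) = (pre.length : Int) + 1 := by
      simp [List.length_append]
    have ihh := ih (pre ++ [d])
      (if pvTestB ds0 ((pre.length : Int), d) then
         acc ++ [((pre.length : Int), pvCtx ds0 (pre.length : Int))] else acc)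
      (by rw [heq]; simp)
    rw [hlen] at ihh
    rw [ihh]
    rw [List.filter_cons]
    by_cases ht : pvTestB ds0 ((pre.length : Int), d) = true
    · simp [ht]
    · simp only [Bool.not_eq_true] at ht
      simp [ht]

-- ===== VERDICT (by name: the statement is the Claim_ definition above) =====
theorem find_unprotected_5_lsb_spec : Claim_equal_find_unprotected_5_lsb := by
  intro n _ _
  unfold Spec_find_unprotected_5_lsb find_unprotected_5_lsb find_unprotected_5_lsb_alt
  have h := pvLoop_eq (pvDigits n) (pvDigits_bounds n) (pvDigits n) [] [] (by simp)
  simpa [pvCarry] using h
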